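-- pv_equiv track=rewrite | github.com/undertheseanlp/pos_tag | models/lstm/train.py | extract_indexes
-- ===== SOURCE A (Python) =====
-- def extract_indexes(train_set):
--     tags_to_indexes = {
--         "<UNK>": 0
--     }
--     words_to_indexes = {
--         "<UNK>": 0
--     }
--     w_i = 1
--     t_i = 1
--     for sentence in train_set:
--         words, tags = zip(*sentence)
--         for word in words:
--             word = word.lower()
--             if word not in words_to_indexes:
--                 words_to_indexes[word] = w_i
--                 w_i += 1
--         for tag in tags:
--             if tag not in tags_to_indexes:
--                 tags_to_indexes[tag] = t_i
--                 t_i += 1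
--     return words_to_indexes, tags_to_indexes
-- ===== SOURCE B (Python) =====
-- def extract_indexes(train_set):
--     words_list = []
--     tags_list = []
--     for sentence in train_set:
--         words, tags = zip(*sentence)
--         words_list.extend(w.lower() for w in words)
--         tags_list.extend(tags)
--     words_to_indexes = {w: i for i, w in enumerate(dict.fromkeys(["<UNK>"] + words_list))}
--     tags_to_indexes = {t: i for i, t in enumerate(dict.fromkeys(["<UNK>"] + tags_list))}
--     return words_to_indexes, tags_to_indexes
-- ===== Notes on version B (the rewrite author's own statement) =====
-- stated objective: simpler
-- what changed: Instead of threading two dictionaries with explicit running counters and per-element membership tests, B collects flat lowered-word and tag streams and builds each index map in one shot with dict.fromkeys first-seen dedup plus enumerate (with '<UNK>' prepended so it gets index 0).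
import Mathlib
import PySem

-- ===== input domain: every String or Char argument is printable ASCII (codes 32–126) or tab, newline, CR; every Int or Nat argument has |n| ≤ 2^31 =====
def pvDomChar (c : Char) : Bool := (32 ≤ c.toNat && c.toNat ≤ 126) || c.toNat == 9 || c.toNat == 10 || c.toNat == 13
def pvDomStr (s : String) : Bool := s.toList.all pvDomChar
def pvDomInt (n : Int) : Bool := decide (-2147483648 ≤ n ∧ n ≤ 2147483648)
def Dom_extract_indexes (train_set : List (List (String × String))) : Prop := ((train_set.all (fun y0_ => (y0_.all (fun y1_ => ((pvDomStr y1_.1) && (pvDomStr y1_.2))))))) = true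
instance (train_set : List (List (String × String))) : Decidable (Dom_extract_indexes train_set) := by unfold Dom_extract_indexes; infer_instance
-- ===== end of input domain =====

-- B builds flat word/tag streams and indexes them in one shot with first-seen dedup + enumerate,
-- instead of A's incremental dictionaries with running counters; objective: simpler.


-- ===== PORT A =====
def extract_indexes (train_set : List (List (String × String))) : (List (String × Int)) × (List (String × Int)) :=
  let init : PySem.Dict String Int × PySem.Dict String Int × Int × Int :=
    (PySem.Dict.empty.insert "<UNK>" 0, PySem.Dict.empty.insert "<UNK>" 0, 1, 1)
  let st := train_set.foldl (fun st sentence =>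
    -- words, tags = zip(*sentence)
    let words := sentence.map (·.1)
    let tags := sentence.map (·.2)
    let wp := words.foldl (fun (p : PySem.Dict String Int × Int) word =>
        let word := PySem.Str.lower word
        if p.1.contains word then p else (p.1.insert word p.2, p.2 + 1)) (st.1, st.2.2.1)
    let tp := tags.foldl (fun (p : PySem.Dict String Int × Int) tag =>
        if p.1.contains tag then p else (p.1.insert tag p.2, p.2 + 1)) (st.2.1, st.2.2.2)
    (wp.1, tp.1, wp.2, tp.2)) init
  (st.1.items, st.2.1.items)

-- ===== PORT B =====
-- {w: i for i, w in enumerate(dict.fromkeys(["<UNK>"] + ks))}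
def pvIndex (ks : List String) : List (String × Int) :=
  (PySem.List.enumerate (PySem.List.dedup ks)).map (fun p => (p.2, p.1))

def extract_indexes_alt (train_set : List (List (String × String))) : (List (String × Int)) × (List (String × Int)) :=
  let lists := train_set.foldl (fun (p : List String × List String) sentence =>
      let words := sentence.map (·.1)
      let tags := sentence.map (·.2)
      (p.1 ++ words.map (fun w => PySem.Str.lower w), p.2 ++ tags)) ([], [])
  (pvIndex ("<UNK>" :: lists.1), pvIndex ("<UNK>" :: lists.2))

-- ===== PRECONDITION & SPEC =====
-- Pre_ excludes train sets containing an empty sentence: there 'words, tags = zip(*sentence)'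
-- raises ValueError in A (and in B alike).
def Pre_extract_indexes (train_set : List (List (String × String))) : Prop :=
  ∀ s ∈ train_set, s ≠ []
instance (train_set : List (List (String × String))) : Decidable (Pre_extract_indexes train_set) := by unfold Pre_extract_indexes; infer_instance

def pvWitness_extract_indexes : (List (List (String × String))) :=
  [[("Hello", "N"), ("World", "V")], [("hello", "N")]]

def Spec_extract_indexes (train_set : List (List (String × String))) (out : (List (String × Int)) × (List (String × Int))) : Prop := out = extract_indexes_alt train_set
instance (train_set : List (List (String × String))) (out : (List (String × Int)) × (List (String × Int))) : Decidable (Spec_extract_indexes train_set out) := by unfold Spec_extract_indexes; infer_instance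

-- ===== CLAIM (what is proved, stated in full; the proofs are below) =====
def Claim_equal_extract_indexes : Prop := ∀ (train_set : List (List (String × String))), Dom_extract_indexes train_set → Pre_extract_indexes train_set → Spec_extract_indexes train_set (extract_indexes train_set)

-- ===== LEMMAS AND PROOFS =====

-- canonical index map of a (distinct) key list: key i ↦ i, in order
def pvCanon (acc : List String) : List (String × Int) :=
  (PySem.List.enumerate acc).map (fun p => (p.2, p.1))

theorem pvCanon_append_singleton (acc : List String) (k : String) :
    pvCanon (acc ++ [k]) = pvCanon acc ++ [(k, (acc.length : Int))] := by
  simp [pvCanon, PySem.List.enumerate_append, PySem.List.enumerate_cons]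

theorem pvKeys_mk_canon (acc : List String) :
    (PySem.Dict.mk (pvCanon acc)).keys = acc := by
  simp only [PySem.Dict.keys_mk, pvCanon, List.map_map]
  exact PySem.List.map_snd_enumerate acc 0

theorem pvContains_mk_canon (acc : List String) (k : String) :
    (PySem.Dict.mk (pvCanon acc)).contains k = decide (k ∈ acc) := by
  rw [PySem.Dict.contains_eq_decide_mem_keys, pvKeys_mk_canon]

-- one dictionary-building inner fold, characterised: it is Set.update on the key list
theorem pvFold_canon (ks acc : List String) :
    ks.foldl (fun (p : PySem.Dict String Int × Int) k =>
        if p.1.contains k then p else (p.1.insert k p.2, p.2 + 1))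
      (PySem.Dict.mk (pvCanon acc), (acc.length : Int))
    = (PySem.Dict.mk (pvCanon (PySem.Set.update acc ks)),
       ((PySem.Set.update acc ks).length : Int)) := by
  induction ks generalizing acc with
  | nil => simp [PySem.Set.update]
  | cons k ks ih =>
    have hupd : PySem.Set.update acc (k :: ks) = PySem.Set.update (PySem.Set.add acc k) ks := by
      simp [PySem.Set.update]
    rw [List.foldl_cons, hupd]
    by_cases hk : k ∈ acc
    · have hadd : PySem.Set.add acc k = acc := by
        simp [PySem.Set.add, PySem.Set.contains, hk]
      rw [pvContains_mk_canon]
      simp only [hk, decide_true, if_pos]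
      rw [hadd]
      exact ih acc
    · have hadd : PySem.Set.add acc k = acc ++ [k] := by
        simp [PySem.Set.add, PySem.Set.contains, hk]
      rw [pvContains_mk_canon]
      simp only [hk, decide_false, if_neg, Bool.false_eq_true, not_false_iff]
      have hins : (PySem.Dict.mk (pvCanon acc)).insert k (acc.length : Int)
          = PySem.Dict.mk (pvCanon (acc ++ [k])) := by
        apply PySem.Dict.ext
        rw [PySem.Dict.items_insert_of_not_contains]
        · rw [pvCanon_append_singleton]
        · rw [pvContains_mk_canon]; simp [hk]
      rw [hins, hadd]
      have h := ih (acc ++ [k])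
      simp only [List.length_append, List.length_cons, List.length_nil] at h
      push_cast at h ⊢
      exact h

def pvFlatW (ts : List (List (String × String))) : List String :=
  ts.flatMap (fun s => (s.map (·.1)).map (fun w => PySem.Str.lower w))
def pvFlatT (ts : List (List (String × String))) : List String :=
  ts.flatMap (fun s => s.map (·.2))

-- A's outer fold, characterised
theorem pvA_fold (ts : List (List (String × String))) (accW accT : List String) :
    ts.foldl (fun st sentence =>
      (((sentence.map (·.1)).foldl (fun (p : PySem.Dict String Int × Int) word =>
          if p.1.contains (PySem.Str.lower word) then p
          else (p.1.insert (PySem.Str.lower word) p.2, p.2 + 1)) (st.1, st.2.2.1)).1,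
       ((sentence.map (·.2)).foldl (fun (p : PySem.Dict String Int × Int) tag =>
          if p.1.contains tag then p else (p.1.insert tag p.2, p.2 + 1)) (st.2.1, st.2.2.2)).1,
       ((sentence.map (·.1)).foldl (fun (p : PySem.Dict String Int × Int) word =>
          if p.1.contains (PySem.Str.lower word) then p
          else (p.1.insert (PySem.Str.lower word) p.2, p.2 + 1)) (st.1, st.2.2.1)).2,
       ((sentence.map (·.2)).foldl (fun (p : PySem.Dict String Int × Int) tag =>
          if p.1.contains tag then p else (p.1.insert tag p.2, p.2 + 1)) (st.2.1, st.2.2.2)).2))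
      (PySem.Dict.mk (pvCanon accW), PySem.Dict.mk (pvCanon accT),
        (accW.length : Int), (accT.length : Int))
    = (PySem.Dict.mk (pvCanon (PySem.Set.update accW (pvFlatW ts))),
       PySem.Dict.mk (pvCanon (PySem.Set.update accT (pvFlatT ts))),
       ((PySem.Set.update accW (pvFlatW ts)).length : Int),
       ((PySem.Set.update accT (pvFlatT ts)).length : Int)) := by
  induction ts generalizing accW accT with
  | nil => simp [pvFlatW, pvFlatT, PySem.Set.update]
  | cons s ts ih =>
    rw [List.foldl_cons]
    have hw : (s.map (·.1)).foldl (fun (p : PySem.Dict String Int × Int) word =>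
          if p.1.contains (PySem.Str.lower word) then p
          else (p.1.insert (PySem.Str.lower word) p.2, p.2 + 1))
        (PySem.Dict.mk (pvCanon accW), (accW.length : Int))
        = (PySem.Dict.mk (pvCanon (PySem.Set.update accW ((s.map (·.1)).map (fun w => PySem.Str.lower w)))),
           ((PySem.Set.update accW ((s.map (·.1)).map (fun w => PySem.Str.lower w))).length : Int)) := by
      have h := pvFold_canon ((s.map (·.1)).map (fun w => PySem.Str.lower w)) accW
      rw [List.foldl_map] at h
      exact h
    have ht := pvFold_canon (s.map (·.2)) accT
    simp only
    rw [hw, ht, ih]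
    have huW : PySem.Set.update accW (pvFlatW (s :: ts))
        = PySem.Set.update (PySem.Set.update accW ((s.map (·.1)).map (fun w => PySem.Str.lower w))) (pvFlatW ts) := by
      simp [pvFlatW, PySem.Set.update, List.foldl_append]
    have huT : PySem.Set.update accT (pvFlatT (s :: ts))
        = PySem.Set.update (PySem.Set.update accT (s.map (·.2))) (pvFlatT ts) := by
      simp [pvFlatT, PySem.Set.update, List.foldl_append]
    rw [huW, huT]

-- B's list-collecting fold, characterised
theorem pvB_fold (ts : List (List (String × String))) (p : List String × List String) :
    ts.foldl (fun (p : List String × List String) sentence =>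
      let words := sentence.map (·.1)
      let tags := sentence.map (·.2)
      (p.1 ++ words.map (fun w => PySem.Str.lower w), p.2 ++ tags)) p
    = (p.1 ++ pvFlatW ts, p.2 ++ pvFlatT ts) := by
  induction ts generalizing p with
  | nil => simp [pvFlatW, pvFlatT]
  | cons s ts ih =>
    rw [List.foldl_cons]
    simp only
    rw [ih]
    simp [pvFlatW, pvFlatT, List.append_assoc]

theorem pvDedup_cons_update (x : String) (l : List String) :
    PySem.List.dedup (x :: l) = PySem.Set.update [x] l := by
  rw [PySem.List.dedup_eq_ofList, PySem.Set.ofList_eq_foldl, List.foldl_cons]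
  rfl

-- ===== VERDICT (by name: the statement is the Claim_ definition above) =====
theorem extract_indexes_spec : Claim_equal_extract_indexes := by
  intro ts _ _
  show extract_indexes ts = extract_indexes_alt ts
  unfold extract_indexes extract_indexes_alt
  simp only
  have hinit : (PySem.Dict.empty.insert "<UNK>" (0 : Int)) = PySem.Dict.mk (pvCanon ["<UNK>"]) := by
    apply PySem.Dict.ext
    simp [pvCanon, PySem.List.enumerate_cons, PySem.Dict.items_insert_of_not_contains,
      PySem.Dict.empty]
  rw [hinit]
  have hA := pvA_fold ts ["<UNK>"] ["<UNK>"]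
  norm_num at hA
  rw [hA, pvB_fold]
  simp only [List.nil_append]
  rw [pvIndex, pvIndex, pvDedup_cons_update, pvDedup_cons_update]
  rfl
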